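-- pv_equiv track=rewrite | github.com/magicsword-io/LOLRMM | bin/streamlit.py | check_hash_lengths
-- ===== SOURCE A (Python) =====
-- def check_hash_lengths(yaml_data):
--     errors = []
--     known_vulnerable_samples = yaml_data.get("KnownVulnerableSamples", [])
--     for sample in known_vulnerable_samples:
--         md5 = sample.get("MD5", "")
--         if md5 and len(md5) != 32:
--             errors.append(f"ERROR: MD5 length is not 32 characters")
--         sha1 = sample.get("SHA1", "")
--         if sha1 and len(sha1) != 40:
--             errors.append(f"ERROR: SHA1 length is not 40 characters")
--         sha256 = sample.get("SHA256", "")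
--         if sha256 and len(sha256) != 64:
--             errors.append(f"ERROR: SHA256 length is not 64 characters")
--     return errors
-- ===== SOURCE B (Python) =====
-- def _bad_flags(samples, key, n):
--     # one pass over samples: True where the field is present-and-nonempty with wrong length
--     return [bool(v) and len(v) != n for v in (s.get(key, "") for s in samples)]
--
-- def check_hash_lengths(yaml_data):
--     samples = yaml_data.get("KnownVulnerableSamples", [])
--     md5_bad = _bad_flags(samples, "MD5", 32)
--     sha1_bad = _bad_flags(samples, "SHA1", 40)
--     sha256_bad = _bad_flags(samples, "SHA256", 64)
--     errors = []
--     for m, s1, s2 in zip(md5_bad, sha1_bad, sha256_bad):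
--         if m:
--             errors.append("ERROR: MD5 length is not 32 characters")
--         if s1:
--             errors.append("ERROR: SHA1 length is not 40 characters")
--         if s2:
--             errors.append("ERROR: SHA256 length is not 64 characters")
--     return errors
-- ===== Notes on version B (the rewrite author's own statement) =====
-- stated objective: alternative
-- what changed: Instead of A's single pass doing all three checks per sample, B runs three staged passes that each compute a boolean bad-length vector for one hash field, then zips the three vectors and emits the constant messages from the flags.
import Mathlib
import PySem

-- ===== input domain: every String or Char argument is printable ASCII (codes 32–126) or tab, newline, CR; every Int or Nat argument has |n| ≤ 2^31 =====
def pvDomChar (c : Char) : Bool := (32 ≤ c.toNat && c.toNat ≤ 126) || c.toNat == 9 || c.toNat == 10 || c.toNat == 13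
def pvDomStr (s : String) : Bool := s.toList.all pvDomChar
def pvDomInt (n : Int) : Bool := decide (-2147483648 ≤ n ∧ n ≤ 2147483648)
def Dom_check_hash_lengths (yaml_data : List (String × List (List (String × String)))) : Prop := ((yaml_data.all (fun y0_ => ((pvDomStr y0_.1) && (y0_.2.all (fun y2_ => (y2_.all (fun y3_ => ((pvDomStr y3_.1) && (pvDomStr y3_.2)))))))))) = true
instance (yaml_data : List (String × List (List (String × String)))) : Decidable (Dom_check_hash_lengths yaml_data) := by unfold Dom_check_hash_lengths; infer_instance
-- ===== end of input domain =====

-- ===== PORT A =====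
-- B restructures A's single all-checks-per-sample pass into three staged per-field passes
-- producing boolean vectors that are then zipped to emit the messages; objective: alternative.
def check_hash_lengths (yaml_data : List (String × List (List (String × String)))) : List String :=
  let known_vulnerable_samples := (PySem.Dict.mk yaml_data).getD "KnownVulnerableSamples" []
  known_vulnerable_samples.foldl (fun errors sample =>
    let md5 := (PySem.Dict.mk sample).getD "MD5" ""
    let errors := if md5 ≠ "" ∧ PySem.Str.len md5 ≠ 32 then errors ++ ["ERROR: MD5 length is not 32 characters"] else errors
    let sha1 := (PySem.Dict.mk sample).getD "SHA1" ""
    let errors := if sha1 ≠ "" ∧ PySem.Str.len sha1 ≠ 40 then errors ++ ["ERROR: SHA1 length is not 40 characters"] else errors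
    let sha256 := (PySem.Dict.mk sample).getD "SHA256" ""
    let errors := if sha256 ≠ "" ∧ PySem.Str.len sha256 ≠ 64 then errors ++ ["ERROR: SHA256 length is not 64 characters"] else errors
    errors) []

-- ===== PORT B =====
-- one pass over samples: true where the field is present-and-nonempty with wrong length
def pvBadFlags (samples : List (List (String × String))) (key : String) (n : Int) : List Bool :=
  samples.map (fun s =>
    let v := (PySem.Dict.mk s).getD key ""
    decide (v ≠ "" ∧ PySem.Str.len v ≠ n))

def check_hash_lengths_alt (yaml_data : List (String × List (List (String × String)))) : List String :=
  let samples := (PySem.Dict.mk yaml_data).getD "KnownVulnerableSamples" []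
  let md5_bad := pvBadFlags samples "MD5" 32
  let sha1_bad := pvBadFlags samples "SHA1" 40
  let sha256_bad := pvBadFlags samples "SHA256" 64
  (md5_bad.zip (sha1_bad.zip sha256_bad)).foldl (fun errors t =>
    let errors := if t.1 then errors ++ ["ERROR: MD5 length is not 32 characters"] else errors
    let errors := if t.2.1 then errors ++ ["ERROR: SHA1 length is not 40 characters"] else errors
    let errors := if t.2.2 then errors ++ ["ERROR: SHA256 length is not 64 characters"] else errors
    errors) []

-- ===== PRECONDITION & SPEC =====
def Spec_check_hash_lengths (yaml_data : List (String × List (List (String × String)))) (out : List String) : Prop := out = check_hash_lengths_alt yaml_data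
instance (yaml_data : List (String × List (List (String × String)))) (out : List String) : Decidable (Spec_check_hash_lengths yaml_data out) := by unfold Spec_check_hash_lengths; infer_instance

-- ===== CLAIM (what is proved, stated in full; the proofs are below) =====
def Claim_equal_check_hash_lengths : Prop := ∀ (yaml_data : List (String × List (List (String × String)))), Dom_check_hash_lengths yaml_data → Spec_check_hash_lengths yaml_data (check_hash_lengths yaml_data)

-- ===== LEMMAS AND PROOFS =====

-- the per-sample error block both loop bodies append
def pvPer (sample : List (String × String)) : List String :=
  (if ((PySem.Dict.mk sample).getD "MD5" "") ≠ "" ∧ PySem.Str.len ((PySem.Dict.mk sample).getD "MD5" "") ≠ 32 then ["ERROR: MD5 length is not 32 characters"] else []) ++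
  (if ((PySem.Dict.mk sample).getD "SHA1" "") ≠ "" ∧ PySem.Str.len ((PySem.Dict.mk sample).getD "SHA1" "") ≠ 40 then ["ERROR: SHA1 length is not 40 characters"] else []) ++
  (if ((PySem.Dict.mk sample).getD "SHA256" "") ≠ "" ∧ PySem.Str.len ((PySem.Dict.mk sample).getD "SHA256" "") ≠ 64 then ["ERROR: SHA256 length is not 64 characters"] else [])

lemma pvA_eq_flatMap (samples : List (List (String × String))) (acc : List String) :
    samples.foldl (fun errors sample =>
      let md5 := (PySem.Dict.mk sample).getD "MD5" ""
      let errors := if md5 ≠ "" ∧ PySem.Str.len md5 ≠ 32 then errors ++ ["ERROR: MD5 length is not 32 characters"] else errors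
      let sha1 := (PySem.Dict.mk sample).getD "SHA1" ""
      let errors := if sha1 ≠ "" ∧ PySem.Str.len sha1 ≠ 40 then errors ++ ["ERROR: SHA1 length is not 40 characters"] else errors
      let sha256 := (PySem.Dict.mk sample).getD "SHA256" ""
      let errors := if sha256 ≠ "" ∧ PySem.Str.len sha256 ≠ 64 then errors ++ ["ERROR: SHA256 length is not 64 characters"] else errors
      errors) acc = acc ++ samples.flatMap pvPer := by
  induction samples generalizing acc with
  | nil => simp
  | cons s rest ih =>
    simp only [List.foldl_cons, List.flatMap_cons, ih]
    simp only [pvPer]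
    split_ifs <;> simp

lemma pvB_eq_flatMap (samples : List (List (String × String))) (acc : List String) :
    ((pvBadFlags samples "MD5" 32).zip ((pvBadFlags samples "SHA1" 40).zip (pvBadFlags samples "SHA256" 64))).foldl (fun errors t =>
      let errors := if t.1 then errors ++ ["ERROR: MD5 length is not 32 characters"] else errors
      let errors := if t.2.1 then errors ++ ["ERROR: SHA1 length is not 40 characters"] else errors
      let errors := if t.2.2 then errors ++ ["ERROR: SHA256 length is not 64 characters"] else errors
      errors) acc = acc ++ samples.flatMap pvPer := by
  induction samples generalizing acc with
  | nil => simp [pvBadFlags]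
  | cons s rest ih =>
    simp only [pvBadFlags, List.map_cons, List.zip_cons_cons, List.foldl_cons]
    simp only [pvBadFlags] at ih
    rw [ih]
    simp only [List.flatMap_cons, pvPer, decide_eq_true_eq]
    split_ifs <;> simp

-- ===== VERDICT (by name: the statement is the Claim_ definition above) =====
theorem check_hash_lengths_spec : Claim_equal_check_hash_lengths := by
  intro yaml_data _
  unfold Spec_check_hash_lengths check_hash_lengths check_hash_lengths_alt
  rw [pvA_eq_flatMap, pvB_eq_flatMap]
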